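-- pv_equiv track=rewrite | github.com/BishtManas/leetcode-practice | 3350 Adjacent Increasing Subarrays Detection II/index.py | maxTwoLength
-- ===== SOURCE A (Python) =====
-- from typing import List
--
-- def maxTwoLength(nums: List[int]) -> int:
--     n = len(nums)
--     inc = [1] * n
--     for i in range(1, n):
--         if nums[i] > nums[i - 1]:
--             inc[i] = inc[i - 1] + 1
--
--     inc_rev = [1] * n
--     for i in range(n - 2, -1, -1):
--         if nums[i] < nums[i + 1]:
--             inc_rev[i] = inc_rev[i + 1] + 1
--
--     max_k = 0
--     for i in range(1, n):
--         k = min(inc[i - 1], inc_rev[i])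
--         if k > max_k:
--             max_k = k
--
--     return max_k
-- ===== SOURCE B (Python) =====
-- from typing import List
--
-- def maxTwoLength(nums: List[int]) -> int:
--     # single streaming pass: cur = length of increasing run ending here,
--     # prev = length of the previous run; no arrays.
--     ans = 0
--     prev = 0
--     cur = 1
--     for i in range(1, len(nums)):
--         if nums[i] > nums[i - 1]:
--             cur += 1
--         else:
--             prev = cur
--             cur = 1
--         ans = max(ans, cur // 2, min(prev, cur))
--     return ans
-- ===== Notes on version B (the rewrite author's own statement) =====
-- stated objective: alternative
-- what changed: Replaces the three passes and two O(n) auxiliary arrays (inc, inc_rev, then a min-scan) with one streaming pass keeping only the current and previous increasing-run lengths, folding the within-run split (cur//2) and run-boundary (min(prev,cur)) cases into one update; same O(n) time, O(1) extra space.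
import Mathlib
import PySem

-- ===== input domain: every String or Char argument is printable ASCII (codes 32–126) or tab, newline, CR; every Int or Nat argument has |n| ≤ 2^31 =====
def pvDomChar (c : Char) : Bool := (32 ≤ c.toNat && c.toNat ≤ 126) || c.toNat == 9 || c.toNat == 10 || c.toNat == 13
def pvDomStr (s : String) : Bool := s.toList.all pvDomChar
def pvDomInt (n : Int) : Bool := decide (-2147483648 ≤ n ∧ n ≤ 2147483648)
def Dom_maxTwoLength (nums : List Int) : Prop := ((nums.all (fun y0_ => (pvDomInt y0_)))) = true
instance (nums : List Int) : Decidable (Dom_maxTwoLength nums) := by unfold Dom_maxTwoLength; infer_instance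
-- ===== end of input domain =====

-- B replaces A's three passes and two O(n) arrays by one streaming pass with O(1) state.

-- ===== PORT A =====
def maxTwoLength (nums : List Int) : Int :=
  let n : Int := nums.length
  let inc : List Int := List.replicate nums.length 1
  let inc := (PySem.List.pyRange 1 n 1).foldl (fun inc i =>
      if PySem.List.pyGetD nums i 0 > PySem.List.pyGetD nums (i - 1) 0 then
        PySem.List.pySetD inc i (PySem.List.pyGetD inc (i - 1) 0 + 1)
      else inc) inc
  let incRev : List Int := List.replicate nums.length 1
  let incRev := (PySem.List.pyRange (n - 2) (-1) (-1)).foldl (fun incRev i =>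
      if PySem.List.pyGetD nums i 0 < PySem.List.pyGetD nums (i + 1) 0 then
        PySem.List.pySetD incRev i (PySem.List.pyGetD incRev (i + 1) 0 + 1)
      else incRev) incRev
  (PySem.List.pyRange 1 n 1).foldl (fun maxK i =>
      let k := min (PySem.List.pyGetD inc (i - 1) 0) (PySem.List.pyGetD incRev i 0)
      if k > maxK then k else maxK) 0

-- ===== PORT B =====
def maxTwoLength_alt (nums : List Int) : Int :=
  let st := (PySem.List.pyRange 1 (nums.length : Int) 1).foldl
    (fun (st : Int × Int × Int) i =>
      let ans := st.1
      let prev := st.2.1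
      let cur := st.2.2
      let pc : Int × Int :=
        if PySem.List.pyGetD nums i 0 > PySem.List.pyGetD nums (i - 1) 0 then
          (prev, cur + 1)
        else (cur, 1)
      (max (max ans (PySem.Int.floordiv pc.2 2)) (min pc.1 pc.2), pc.1, pc.2))
    (0, 0, 1)
  st.1

-- ===== PRECONDITION & SPEC =====
def Spec_maxTwoLength (nums : List Int) (out : Int) : Prop := out = maxTwoLength_alt nums
instance (nums : List Int) (out : Int) : Decidable (Spec_maxTwoLength nums out) := by unfold Spec_maxTwoLength; infer_instance

-- ===== CLAIM (what is proved, stated in full; the proofs are below) =====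
def Claim_equal_maxTwoLength : Prop := ∀ (nums : List Int), Dom_maxTwoLength nums → Spec_maxTwoLength nums (maxTwoLength nums)

-- ===== LEMMAS AND PROOFS =====

/-- element access with default, as A/B read it -/
def gN (nums : List Int) (j : Nat) : Int := nums.getD j 0

/-- length of the maximal strictly increasing run ending at index j -/
def incN (nums : List Int) : Nat → Nat
  | 0 => 1
  | j + 1 => if gN nums j < gN nums (j + 1) then incN nums j + 1 else 1

/-- length of the maximal strictly increasing run starting at index j -/
def revN (nums : List Int) (j : Nat) : Nat :=
  if _h : nums.length ≤ j + 1 then 1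
  else if gN nums j < gN nums (j + 1) then revN nums (j + 1) + 1 else 1
termination_by nums.length - j
decreasing_by omega

/-- length of the run just before the run that ends at k (0 if none) -/
def prevN (nums : List Int) (k : Nat) : Nat :=
  if incN nums k ≤ k then incN nums (k - incN nums k) else 0

def alphaN (nums : List Int) (k : Nat) : Nat :=
  min (incN nums k) (revN nums (k + 1))

def betaN (nums : List Int) (k : Nat) : Nat :=
  max (incN nums (k + 1) / 2) (min (prevN nums (k + 1)) (incN nums (k + 1)))

def fmax (f : Nat → Nat) (l : List Nat) : Nat := l.foldl (fun a k => max a (f k)) 0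

theorem foldl_max_le {f : Nat → Nat} {l : List Nat} {a M : Nat} :
    l.foldl (fun a k => max a (f k)) a ≤ M ↔ a ≤ M ∧ ∀ k ∈ l, f k ≤ M := by
  induction l generalizing a with
  | nil => simp
  | cons x xs ih =>
    rw [List.foldl_cons, ih]
    simp only [List.mem_cons]
    constructor
    · rintro ⟨h1, h2⟩
      refine ⟨le_trans (le_max_left _ _) h1, fun k hk => ?_⟩
      rcases hk with rfl | hk
      · exact le_trans (le_max_right _ _) h1
      · exact h2 k hk
    · rintro ⟨h1, h2⟩
      exact ⟨max_le h1 (h2 x (Or.inl rfl)), fun k hk => h2 k (Or.inr hk)⟩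

theorem fmax_le_iff {f : Nat → Nat} {l : List Nat} {M : Nat} :
    fmax f l ≤ M ↔ ∀ k ∈ l, f k ≤ M := by
  unfold fmax; rw [foldl_max_le]; simp

theorem le_fmax {f : Nat → Nat} {l : List Nat} {k : Nat} (h : k ∈ l) : f k ≤ fmax f l := by
  by_contra hc
  have := (fmax_le_iff (M := fmax f l)).mp le_rfl k h
  omega

theorem incN_pos (nums : List Int) (k : Nat) : 1 ≤ incN nums k := by
  cases k <;> simp [incN] <;> split <;> omega

theorem incN_le (nums : List Int) (k : Nat) : incN nums k ≤ k + 1 := by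
  induction k with
  | zero => simp [incN]
  | succ j ih => simp only [incN]; split <;> omega

/-- inverting the inc recursion at a point where the run has length ≥ 2 -/
theorem incN_back {nums : List Int} {m : Nat} (h : 2 ≤ incN nums m) :
    1 ≤ m ∧ gN nums (m - 1) < gN nums m ∧ incN nums (m - 1) + 1 = incN nums m := by
  cases m with
  | zero => simp [incN] at h
  | succ j =>
    simp only [incN] at h ⊢
    split at h
    · next hg => simpa [hg] using ⟨hg, rfl⟩
    · omega

theorem incN_chain_back {nums : List Int} {k : Nat} :
    ∀ j, j + 1 ≤ incN nums k → incN nums (k - j) = incN nums k - j := by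
  intro j
  induction j with
  | zero => simp
  | succ i ih =>
    intro h
    have hi := ih (by omega)
    have h2 : 2 ≤ incN nums (k - i) := by omega
    obtain ⟨h1, _, h3⟩ := incN_back h2
    have : k - (i + 1) = k - i - 1 := by omega
    rw [this]
    omega

theorem revN_unfold (nums : List Int) (j : Nat) :
    revN nums j = if nums.length ≤ j + 1 then 1
      else if gN nums j < gN nums (j + 1) then revN nums (j + 1) + 1 else 1 := by
  rw [revN]
  split <;> rfl

theorem revN_pos (nums : List Int) (j : Nat) : 1 ≤ revN nums j := by
  rw [revN_unfold]
  split
  · omega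
  · split <;> omega

/-- inverting the rev recursion where the run has length ≥ 2 -/
theorem revN_step {nums : List Int} {j : Nat} (h : 2 ≤ revN nums j) :
    j + 1 < nums.length ∧ gN nums j < gN nums (j + 1) ∧ revN nums (j + 1) + 1 = revN nums j := by
  rw [revN_unfold] at h
  split at h
  · omega
  · next hlen =>
    split at h
    · next hg =>
      refine ⟨by omega, hg, ?_⟩
      conv_rhs => rw [revN_unfold]
      simp [hlen, hg]
    · omega

theorem revN_len {nums : List Int} {j : Nat} (hj : j < nums.length) :
    j + revN nums j ≤ nums.length := by
  by_cases h : 2 ≤ revN nums j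
  · obtain ⟨h1, _, h3⟩ := revN_step h
    have := revN_len (j := j + 1) h1
    omega
  · have := revN_pos nums j
    omega
termination_by nums.length - j
decreasing_by omega

/-- inc grows along the run described by rev -/
theorem incN_forward {nums : List Int} {i : Nat} :
    ∀ j, j + 1 ≤ revN nums i → incN nums (i + j) = incN nums i + j ∧ revN nums (i + j) = revN nums i - j := by
  intro j
  induction j with
  | zero => simp
  | succ m ih =>
    intro h
    obtain ⟨ih1, ih2⟩ := ih (by omega)
    have h2 : 2 ≤ revN nums (i + m) := by omega
    obtain ⟨_, hg, h3⟩ := revN_step h2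
    constructor
    · have : incN nums (i + m + 1) = incN nums (i + m) + 1 := by
        simp [incN, hg]
      rw [show i + (m+1) = i + m + 1 by omega, this]; omega
    · rw [show i + (m+1) = i + m + 1 by omega]; omega

/-- a consecutive increasing chain of length m starting at i gives revN i ≥ m+1 -/
theorem revN_ge_chain {nums : List Int} :
    ∀ (m i : Nat), i + m < nums.length → (∀ j < m, gN nums (i + j) < gN nums (i + j + 1)) →
      m + 1 ≤ revN nums i := by
  intro m
  induction m with
  | zero => intro i _ _; exact revN_pos nums i
  | succ p ih =>
    intro i hlen hch
    have h0 : gN nums i < gN nums (i + 1) := by simpa using hch 0 (by omega)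
    have hrec : revN nums i = revN nums (i + 1) + 1 := by
      rw [revN_unfold]
      have : ¬ nums.length ≤ i + 1 := by omega
      simp [this, h0]
    have := ih (i + 1) (by omega) (by
      intro j hj
      have h := hch (j + 1) (by omega)
      have e1 : i + (j + 1) = i + 1 + j := by omega
      rw [e1] at h
      exact h)
    omega

theorem amax_le_bmax (nums : List Int) :
    fmax (alphaN nums) (List.range (nums.length - 1)) ≤
    fmax (betaN nums) (List.range (nums.length - 1)) := by
  rw [fmax_le_iff]
  intro k hk
  rw [List.mem_range] at hk
  set n := nums.length with hn
  set i := k + 1 with hi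
  have hin : i < n := by omega
  set r := revN nums i with hr
  have hr1 : 1 ≤ r := revN_pos nums i
  have hrlen : i + r ≤ n := revN_len hin
  set e := i + r - 1 with he
  have hef : incN nums e = incN nums i + (r - 1) ∧ revN nums e = r - (r - 1) := by
    have := incN_forward (nums := nums) (i := i) (r - 1) (by omega)
    rw [hr] at this ⊢
    convert this using 3 <;> omega
  have heform : e = (e - 1) + 1 := by omega
  by_cases hg : gN nums (i - 1) < gN nums i
  · -- i is inside a run: α k ≤ incN e / 2 ≤ β (e-1)
    have hinc_i : incN nums i = incN nums k + 1 := by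
      have : i = k + 1 := hi
      simp [this, incN, show gN nums k < gN nums (k+1) by simpa [hi] using hg]
    have hb : betaN nums (e - 1) ≥ incN nums e / 2 := by
      unfold betaN; rw [← heform]; omega
    have : alphaN nums k ≤ incN nums e / 2 := by
      unfold alphaN
      rw [← hr]
      have := hef.1
      omega
    calc alphaN nums k ≤ betaN nums (e - 1) := by omega
      _ ≤ _ := le_fmax (by rw [List.mem_range]; omega)
  · -- i starts a new run: α k ≤ min (prevN e) (incN e) ≤ β (e-1)
    have hinc_i : incN nums i = 1 := by
      have : i = k + 1 := hi
      simp [this, incN, show ¬ gN nums k < gN nums (k+1) by simpa [hi] using hg]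
    have hince : incN nums e = r := by omega
    have hprev : prevN nums e = incN nums k := by
      unfold prevN
      rw [hince]
      have h1 : r ≤ e := by omega
      have h2 : e - r = k := by omega
      simp [h1, h2]
    have hb : betaN nums (e - 1) ≥ min (incN nums k) r := by
      unfold betaN; rw [← heform, hprev, hince]; omega
    have : alphaN nums k ≤ min (incN nums k) r := by unfold alphaN; rw [← hr]
    calc alphaN nums k ≤ betaN nums (e - 1) := by omega
      _ ≤ _ := le_fmax (by rw [List.mem_range]; omega)

theorem chain_in_run {nums : List Int} {k : Nat} :
    ∀ p, p + 1 < incN nums k → gN nums (k - p - 1) < gN nums (k - p) := by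
  intro p hp
  have h1 : incN nums (k - p) = incN nums k - p := incN_chain_back p (by omega)
  have h2 : 2 ≤ incN nums (k - p) := by omega
  obtain ⟨_, hg, _⟩ := incN_back h2
  exact hg

theorem bmax_le_amax (nums : List Int) :
    fmax (betaN nums) (List.range (nums.length - 1)) ≤
    fmax (alphaN nums) (List.range (nums.length - 1)) := by
  rw [fmax_le_iff]
  intro k hk
  rw [List.mem_range] at hk
  set n := nums.length with hn
  set K := k + 1 with hK
  have hKn : K < n := by omega
  set c := incN nums K with hc
  have hc1 : 1 ≤ c := incN_pos nums K
  have hcle : c ≤ K + 1 := incN_le nums K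
  have half_le : c / 2 ≤ fmax (alphaN nums) (List.range (n - 1)) := by
    by_cases hd : c / 2 = 0
    · omega
    · set d := c / 2 with hdd
      have hc2 : 2 ≤ c := by omega
      have hdc : d + 1 ≤ c := by omega
      set i := K - d with hi2
      -- incN at i = c - d
      have hinc : incN nums i = c - d := incN_chain_back d hdc
      -- rev at i+... : chain from i to K
      have hrge : d ≤ revN nums (i + 1) := by
        rcases Nat.eq_or_lt_of_le (show 1 ≤ d by omega) with h1 | h1
        · have := revN_pos nums (i + 1); omega
        · have := revN_ge_chain (nums := nums) (d - 1) (i + 1) (by omega) (by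
            intro j hj
            have h := chain_in_run (nums := nums) (k := K) (K - (i + 1 + j + 1)) (by omega)
            have e1 : K - (K - (i + 1 + j + 1)) = i + 1 + j + 1 := by omega
            have e2 : K - (K - (i + 1 + j + 1)) - 1 = i + 1 + j := by omega
            rw [e1] at h
            have e3 : i + 1 + j + 1 - 1 = i + 1 + j := by omega
            rw [e3] at h
            exact h)
          omega
      have ha : d ≤ alphaN nums i := by
        unfold alphaN
        omega
      calc c / 2 ≤ alphaN nums i := ha
        _ ≤ _ := le_fmax (by rw [List.mem_range]; omega)
  have cross_le : min (prevN nums K) c ≤ fmax (alphaN nums) (List.range (n - 1)) := by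
    by_cases hp : prevN nums K = 0
    · omega
    · have hcK : c ≤ K := by
        by_contra hcon
        have h0 : prevN nums K = 0 := by unfold prevN; rw [← hc]; simp [hcon]
        omega
      have hprev : prevN nums K = incN nums (K - c) := by
        unfold prevN; rw [← hc]; simp [hcK]
      set s := K - c + 1 with hs
      have hrge : c ≤ revN nums s := by
        rcases Nat.eq_or_lt_of_le hc1 with h1 | h1
        · have := revN_pos nums s; omega
        · have := revN_ge_chain (nums := nums) (c - 1) s (by omega) (by
            intro j hj
            have h := chain_in_run (nums := nums) (k := K) (K - (s + j + 1)) (by omega)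
            have e1 : K - (K - (s + j + 1)) = s + j + 1 := by omega
            have e2 : K - (K - (s + j + 1)) - 1 = s + j := by omega
            rw [e1] at h
            have e3 : s + j + 1 - 1 = s + j := by omega
            rw [e3] at h
            exact h)
          omega
      have ha : min (prevN nums K) c ≤ alphaN nums (K - c) := by
        unfold alphaN
        rw [show K - c + 1 = s by omega, ← hprev]
        omega
      calc min (prevN nums K) c ≤ alphaN nums (K - c) := ha
        _ ≤ _ := le_fmax (by rw [List.mem_range]; omega)
  unfold betaN
  rw [← hK, ← hc]
  omega

-- ======== bridging the ports to the Nat-level specs ========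

theorem getD_map_range' {f : Nat → Int} {n j : Nat} (h : j < n) (d : Int) :
    ((List.range n).map f).getD j d = f j := by
  simp [List.getD, h]

theorem set_map_range {f : Nat → Int} {n m : Nat} (v : Int) :
    ((List.range n).map f).set m v = (List.range n).map (fun j => if j = m then v else f j) := by
  apply List.ext_getElem
  · simp
  · intro j hj1 hj2
    simp only [List.getElem_set, List.getElem_map, List.getElem_range]
    split
    · next h => simp [h.symm]
    · next h =>
      rw [if_neg (fun hh => h hh.symm)]

theorem replicate_one_eq_map (n : Nat) :
    List.replicate n (1 : Int) = (List.range n).map (fun _ => (1 : Int)) := by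
  apply List.ext_getElem <;> simp

theorem incList_aux (nums : List Int) :
    ∀ (m : Nat), m ≤ nums.length →
    ((PySem.List.pyRange 1 (m : Int) 1).foldl (fun inc i =>
      if PySem.List.pyGetD nums i 0 > PySem.List.pyGetD nums (i - 1) 0 then
        PySem.List.pySetD inc i (PySem.List.pyGetD inc (i - 1) 0 + 1)
      else inc) (List.replicate nums.length 1)) =
    (List.range nums.length).map (fun j => if j < m then (incN nums j : Int) else 1) := by
  intro m
  induction m with
  | zero =>
    intro _
    rw [PySem.List.pyRange_one_eq_nil (by omega), List.foldl_nil, replicate_one_eq_map]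
    simp
  | succ m ih =>
    intro hm
    by_cases hm0 : m = 0
    · subst hm0
      rw [show ((1:Nat) : Int) = 1 by norm_num, PySem.List.pyRange_one_eq_nil (by omega),
        List.foldl_nil, replicate_one_eq_map]
      apply List.ext_getElem
      · simp
      · intro j hj1 hj2
        simp only [List.getElem_map, List.getElem_range]
        split
        · next h => simp [show j = 0 by omega, incN]
        · rfl
    · have h1m : 1 ≤ m := by omega
      have hrange : PySem.List.pyRange 1 ((m + 1 : Nat) : Int) 1
          = PySem.List.pyRange 1 (m : Int) 1 ++ [(m : Int)] := by
        push_cast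
        rw [PySem.List.pyRange_one_succ_right (by exact_mod_cast h1m)]
      rw [hrange, List.foldl_append, ih (by omega), List.foldl_cons, List.foldl_nil]
      have hcast : ((m : Int) - 1) = ((m - 1 : Nat) : Int) := by push_cast [h1m]; ring
      have hmn : m < nums.length := by omega
      have hget1 : PySem.List.pyGetD nums (m : Int) 0 = gN nums m := by
        simp [PySem.List.pyGetD_natCast, gN]
      have hget2 : PySem.List.pyGetD nums ((m : Int) - 1) 0 = gN nums (m - 1) := by
        rw [hcast]; simp [PySem.List.pyGetD_natCast, gN]
      have hget3 : PySem.List.pyGetD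
          ((List.range nums.length).map (fun j => if j < m then (incN nums j : Int) else 1))
          ((m : Int) - 1) 0 = (incN nums (m - 1) : Int) := by
        rw [hcast]
        rw [PySem.List.pyGetD_natCast]
        rw [getD_map_range' (by omega)]
        simp [show m - 1 < m by omega]
      rw [hget1, hget2, hget3]
      by_cases hg : gN nums (m - 1) < gN nums m
      · rw [if_pos (by exact_mod_cast hg)]
        rw [PySem.List.pySetD_natCast, set_map_range]
        apply List.map_congr_left
        intro j _
        by_cases hjm : j = m
        · subst hjm
          have : incN nums j = incN nums (j - 1) + 1 := by
            rcases Nat.exists_eq_succ_of_ne_zero hm0 with ⟨p, rfl⟩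
            simp [incN, show p + 1 - 1 = p by omega] at hg ⊢
            simp [hg]
          rw [if_pos rfl, if_pos (show j < j + 1 by omega), this]
          push_cast
          ring
        · simp only [if_neg hjm]
          by_cases hlt : j < m
          · simp [hlt, show j < m + 1 by omega]
          · simp [hlt, show ¬ j < m + 1 by omega]
      · rw [if_neg (by exact_mod_cast hg)]
        apply List.map_congr_left
        intro j _
        by_cases hjm : j = m
        · subst hjm
          have : incN nums j = 1 := by
            rcases Nat.exists_eq_succ_of_ne_zero hm0 with ⟨p, rfl⟩
            simp [incN, show p + 1 - 1 = p by omega] at hg ⊢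
            simp [hg]
          rw [if_neg (show ¬ j < j by omega), if_pos (show j < j + 1 by omega), this]
          norm_num
        · by_cases hlt : j < m
          · simp [hlt, show j < m + 1 by omega]
          · simp [hlt, show ¬ j < m + 1 by omega]


theorem incList_eq (nums : List Int) :
    ((PySem.List.pyRange 1 (nums.length : Int) 1).foldl (fun inc i =>
      if PySem.List.pyGetD nums i 0 > PySem.List.pyGetD nums (i - 1) 0 then
        PySem.List.pySetD inc i (PySem.List.pyGetD inc (i - 1) 0 + 1)
      else inc) (List.replicate nums.length 1)) =
    (List.range nums.length).map (fun j => (incN nums j : Int)) := by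
  rw [incList_aux nums nums.length le_rfl]
  apply List.map_congr_left
  intro j hj
  rw [List.mem_range] at hj
  simp [hj]

theorem revList_aux (nums : List Int) :
    ∀ (t : Nat), t ≤ nums.length - 1 →
    ((PySem.List.pyRange ((t : Int) - 1) (-1) (-1)).foldl (fun incRev i =>
      if PySem.List.pyGetD nums i 0 < PySem.List.pyGetD nums (i + 1) 0 then
        PySem.List.pySetD incRev i (PySem.List.pyGetD incRev (i + 1) 0 + 1)
      else incRev)
      ((List.range nums.length).map (fun j => if t ≤ j then (revN nums j : Int) else 1))) =
    (List.range nums.length).map (fun j => (revN nums j : Int)) := by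
  intro t
  induction t with
  | zero =>
    intro _
    rw [PySem.List.pyRange_neg_one_eq_nil (by omega), List.foldl_nil]
    simp
  | succ t ih =>
    intro ht
    have htn : t + 1 < nums.length := by omega
    have hcons : PySem.List.pyRange (((t + 1 : Nat) : Int) - 1) (-1) (-1)
        = (t : Int) :: PySem.List.pyRange ((t : Int) - 1) (-1) (-1) := by
      push_cast
      rw [show (t : Int) + 1 - 1 = (t : Int) by ring]
      exact PySem.List.pyRange_neg_one_cons (by omega)
    rw [hcons, List.foldl_cons]
    have hstep : (if PySem.List.pyGetD nums (t : Int) 0 < PySem.List.pyGetD nums ((t : Int) + 1) 0 then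
        PySem.List.pySetD
          ((List.range nums.length).map (fun j => if t + 1 ≤ j then (revN nums j : Int) else 1))
          (t : Int)
          (PySem.List.pyGetD
            ((List.range nums.length).map (fun j => if t + 1 ≤ j then (revN nums j : Int) else 1))
            ((t : Int) + 1) 0 + 1)
      else ((List.range nums.length).map (fun j => if t + 1 ≤ j then (revN nums j : Int) else 1)))
      = (List.range nums.length).map (fun j => if t ≤ j then (revN nums j : Int) else 1) := by
      have hg1 : PySem.List.pyGetD nums (t : Int) 0 = gN nums t := by
        simp [PySem.List.pyGetD_natCast, gN]
      have hg2 : PySem.List.pyGetD nums ((t : Int) + 1) 0 = gN nums (t + 1) := by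
        have e1 : ((t : Int) + 1) = (((t + 1 : Nat)) : Int) := by push_cast; ring
        rw [e1, PySem.List.pyGetD_natCast]
        rfl
      have hg3 : PySem.List.pyGetD
          ((List.range nums.length).map (fun j => if t + 1 ≤ j then (revN nums j : Int) else 1))
          ((t : Int) + 1) 0 = (revN nums (t + 1) : Int) := by
        have e1 : ((t : Int) + 1) = (((t + 1 : Nat)) : Int) := by push_cast; ring
        rw [e1, PySem.List.pyGetD_natCast, getD_map_range' htn]
        rw [if_pos le_rfl]
      have hrevt : revN nums t = if gN nums t < gN nums (t + 1) then revN nums (t + 1) + 1 else 1 := by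
        rw [revN_unfold, if_neg (by omega)]
      rw [hg1, hg2, hg3]
      by_cases hg : gN nums t < gN nums (t + 1)
      · rw [if_pos hg, PySem.List.pySetD_natCast, set_map_range]
        apply List.map_congr_left
        intro j _
        by_cases hjt : j = t
        · subst hjt
          rw [if_pos rfl, if_pos le_rfl, hrevt, if_pos hg]
          push_cast
          ring
        · rw [if_neg hjt]
          by_cases hle : t ≤ j
          · rw [if_pos (by omega), if_pos hle]
          · rw [if_neg (by omega), if_neg hle]
      · rw [if_neg hg]
        apply List.map_congr_left
        intro j _
        by_cases hjt : j = t
        · subst hjt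
          rw [if_neg (by omega), if_pos le_rfl, hrevt, if_neg hg]
          norm_num
        · by_cases hle : t ≤ j
          · rw [if_pos (by omega), if_pos hle]
          · rw [if_neg (by omega), if_neg hle]
    rw [hstep]
    exact ih (by omega)

theorem revList_eq (nums : List Int) :
    ((PySem.List.pyRange ((nums.length : Int) - 2) (-1) (-1)).foldl (fun incRev i =>
      if PySem.List.pyGetD nums i 0 < PySem.List.pyGetD nums (i + 1) 0 then
        PySem.List.pySetD incRev i (PySem.List.pyGetD incRev (i + 1) 0 + 1)
      else incRev) (List.replicate nums.length 1)) =
    (List.range nums.length).map (fun j => (revN nums j : Int)) := by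
  rcases Nat.eq_zero_or_pos nums.length with h0 | hpos
  · rw [PySem.List.pyRange_neg_one_eq_nil (by omega), List.foldl_nil]
    rw [show nums.length = 0 from h0]
    simp
  · have hinit : List.replicate nums.length (1 : Int)
        = (List.range nums.length).map
            (fun j => if nums.length - 1 ≤ j then (revN nums j : Int) else 1) := by
      rw [replicate_one_eq_map]
      apply List.map_congr_left
      intro j hj
      rw [List.mem_range] at hj
      by_cases hle : nums.length - 1 ≤ j
      · rw [if_pos hle]
        have : revN nums j = 1 := by rw [revN_unfold, if_pos (by omega)]
        simp [this]
      · rw [if_neg hle]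
    have hcast : ((nums.length : Int) - 2) = (((nums.length - 1 : Nat) : Int) - 1) := by
      push_cast [hpos]
      ring
    rw [hcast, hinit]
    exact revList_aux nums (nums.length - 1) le_rfl

theorem fmax_append (f : Nat → Nat) (l : List Nat) (x : Nat) :
    fmax f (l ++ [x]) = max (fmax f l) (f x) := by
  unfold fmax
  rw [List.foldl_append]
  rfl

theorem thirdLoop_aux (nums : List Int) :
    ∀ (m : Nat), m ≤ nums.length →
    ((PySem.List.pyRange 1 (m : Int) 1).foldl (fun maxK i =>
      let k := min
        (PySem.List.pyGetD ((List.range nums.length).map (fun j => (incN nums j : Int))) (i - 1) 0)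
        (PySem.List.pyGetD ((List.range nums.length).map (fun j => (revN nums j : Int))) i 0)
      if k > maxK then k else maxK) 0)
    = (fmax (alphaN nums) (List.range (m - 1)) : Int) := by
  intro m
  induction m with
  | zero =>
    intro _
    rw [PySem.List.pyRange_one_eq_nil (by omega), List.foldl_nil]
    simp [fmax]
  | succ m ih =>
    intro hm
    by_cases hm0 : m = 0
    · subst hm0
      rw [show ((1:Nat) : Int) = 1 by norm_num, PySem.List.pyRange_one_eq_nil (by omega),
        List.foldl_nil]
      simp [fmax]
    · have h1m : 1 ≤ m := by omega
      have hrange : PySem.List.pyRange 1 ((m + 1 : Nat) : Int) 1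
          = PySem.List.pyRange 1 (m : Int) 1 ++ [(m : Int)] := by
        push_cast
        rw [PySem.List.pyRange_one_succ_right (by exact_mod_cast h1m)]
      rw [hrange, List.foldl_append, ih (by omega), List.foldl_cons, List.foldl_nil]
      have e1 : ((m : Int) - 1) = ((m - 1 : Nat) : Int) := by push_cast [h1m]; ring
      have hga : PySem.List.pyGetD
          ((List.range nums.length).map (fun j => (incN nums j : Int))) ((m : Int) - 1) 0
          = (incN nums (m - 1) : Int) := by
        rw [e1, PySem.List.pyGetD_natCast, getD_map_range' (by omega)]
      have hgb : PySem.List.pyGetD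
          ((List.range nums.length).map (fun j => (revN nums j : Int))) ((m : Int)) 0
          = (revN nums m : Int) := by
        rw [PySem.List.pyGetD_natCast, getD_map_range' (by omega)]
      simp only [hga, hgb]
      have hmin : min ((incN nums (m - 1) : Nat) : Int) ((revN nums m : Nat) : Int)
          = ((alphaN nums (m - 1) : Nat) : Int) := by
        unfold alphaN
        rw [show m - 1 + 1 = m by omega]
        push_cast
        ring_nf
      rw [hmin, show m + 1 - 1 = (m - 1) + 1 by omega, List.range_succ, fmax_append]
      split
      · next h => push_cast at h ⊢; omega
      · next h => push_cast at h ⊢; omega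

theorem portA_eq (nums : List Int) :
    maxTwoLength nums = (fmax (alphaN nums) (List.range (nums.length - 1)) : Int) := by
  unfold maxTwoLength
  simp only [incList_eq nums, revList_eq nums]
  exact thirdLoop_aux nums nums.length le_rfl

theorem prevN_succ_inc {nums : List Int} {m : Nat} (h : gN nums m < gN nums (m + 1)) :
    prevN nums (m + 1) = prevN nums m ∧ incN nums (m + 1) = incN nums m + 1 := by
  have hi : incN nums (m + 1) = incN nums m + 1 := by simp [incN, h]
  refine ⟨?_, hi⟩
  unfold prevN
  rw [hi]
  by_cases hle : incN nums m ≤ m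
  · rw [if_pos (by omega), if_pos hle]
    congr 1
    omega
  · rw [if_neg (by omega), if_neg hle]

theorem prevN_succ_brk {nums : List Int} {m : Nat} (h : ¬ gN nums m < gN nums (m + 1)) :
    prevN nums (m + 1) = incN nums m ∧ incN nums (m + 1) = 1 := by
  have hi : incN nums (m + 1) = 1 := by simp [incN, h]
  refine ⟨?_, hi⟩
  unfold prevN
  rw [hi, if_pos (by omega)]
  simp

theorem bLoop_aux (nums : List Int) :
    ∀ (m : Nat), m + 1 ≤ nums.length →
    ((PySem.List.pyRange 1 ((m + 1 : Nat) : Int) 1).foldl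
      (fun (st : Int × Int × Int) i =>
        let ans := st.1
        let prev := st.2.1
        let cur := st.2.2
        let pc : Int × Int :=
          if PySem.List.pyGetD nums i 0 > PySem.List.pyGetD nums (i - 1) 0 then
            (prev, cur + 1)
          else (cur, 1)
        (max (max ans (PySem.Int.floordiv pc.2 2)) (min pc.1 pc.2), pc.1, pc.2))
      (0, 0, 1))
    = ((fmax (betaN nums) (List.range m) : Int),
       ((prevN nums m : Int), (incN nums m : Int))) := by
  intro m
  induction m with
  | zero =>
    intro _
    rw [show ((1:Nat) : Int) = 1 by norm_num, PySem.List.pyRange_one_eq_nil (by omega),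
      List.foldl_nil]
    simp [fmax, prevN, incN]
  | succ m ih =>
    intro hm
    have hrange : PySem.List.pyRange 1 ((m + 2 : Nat) : Int) 1
        = PySem.List.pyRange 1 ((m + 1 : Nat) : Int) 1 ++ [((m + 1 : Nat) : Int)] := by
      have e2 : ((m + 2 : Nat) : Int) = ((m + 1 : Nat) : Int) + 1 := by push_cast; ring
      rw [e2, PySem.List.pyRange_one_succ_right (by exact_mod_cast (by omega : 1 ≤ m + 1))]
    rw [show m + 1 + 1 = m + 2 by omega, hrange, List.foldl_append, ih (by omega),
      List.foldl_cons, List.foldl_nil]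
    have e1 : (((m + 1 : Nat) : Int) - 1) = ((m : Nat) : Int) := by push_cast; ring
    have hga : PySem.List.pyGetD nums ((m + 1 : Nat) : Int) 0 = gN nums (m + 1) := by
      rw [PySem.List.pyGetD_natCast]; rfl
    have hgb : PySem.List.pyGetD nums (((m + 1 : Nat) : Int) - 1) 0 = gN nums m := by
      rw [e1, PySem.List.pyGetD_natCast]; rfl
    simp only [hga, hgb]
    have hfm : fmax (betaN nums) (List.range (m + 1))
        = max (fmax (betaN nums) (List.range m)) (betaN nums m) := by
      rw [List.range_succ, fmax_append]
    rw [hfm]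
    by_cases hg : gN nums m < gN nums (m + 1)
    · obtain ⟨hp, hc⟩ := prevN_succ_inc hg
      rw [if_pos hg]
      simp only [Prod.mk.injEq]
      refine ⟨?_, by rw [hp], by rw [hc]; push_cast; ring⟩
      have e3 : ((incN nums m : Nat) : Int) + 1 = ((incN nums m + 1 : Nat) : Int) := by
        push_cast; ring
      have hfd : PySem.Int.floordiv ((incN nums m + 1 : Nat) : Int) 2
          = (((incN nums m + 1) / 2 : Nat) : Int) :=
        PySem.Int.floordiv_natCast (incN nums m + 1) 2
      rw [e3, hfd]
      simp only [betaN, hp, hc]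
      push_cast
      omega
    · obtain ⟨hp, hc⟩ := prevN_succ_brk hg
      rw [if_neg hg]
      simp only [Prod.mk.injEq]
      refine ⟨?_, by rw [hp], by rw [hc]; norm_num⟩
      have hfd1 : PySem.Int.floordiv 1 2 = 0 := by decide
      simp only [hfd1, betaN, hp, hc]
      push_cast
      omega

theorem portB_eq (nums : List Int) :
    maxTwoLength_alt nums = (fmax (betaN nums) (List.range (nums.length - 1)) : Int) := by
  unfold maxTwoLength_alt
  rcases Nat.eq_zero_or_pos nums.length with h0 | hpos
  · rw [h0]
    rw [show ((0:Nat) : Int) = 0 by norm_num, PySem.List.pyRange_one_eq_nil (by omega),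
      List.foldl_nil]
    simp [fmax]
  · have e : ((nums.length : Nat) : Int) = ((nums.length - 1 + 1 : Nat) : Int) := by
      push_cast [hpos]
      ring
    rw [e, bLoop_aux nums (nums.length - 1) (by omega)]

-- ===== VERDICT (by name: the statement is the Claim_ definition above) =====
theorem maxTwoLength_spec : Claim_equal_maxTwoLength := by
  intro nums _
  unfold Spec_maxTwoLength
  rw [portA_eq, portB_eq]
  have h1 := amax_le_bmax nums
  have h2 := bmax_le_amax nums
  omega
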